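-- pv_equiv track=rewrite | github.com/ljyou001/Leetcode-Problems-in-Python | rq-uber-building-density-of-house-district.py | solution
-- ===== SOURCE A (Python) =====
-- def solution(queries):
--     built = {}
--     res = []
--     max_value = 0
--
--     for i in queries:
--         if i in built:
--             res.append(max_value)
--             continue
--
--         left_size = built.get(i - 1, 0)
--         right_size = built.get(i + 1, 0)
--         total_size = left_size + right_size + 1
--
--         built[i] = total_size
--         built[i - left_size] = total_size  # left boundary
--         built[i + right_size] = total_size  # right boundary
--
--         max_value = max(max_value, total_size)
--         res.append(max_value)
--
--     return res
-- ===== SOURCE B (Python) =====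
-- def solution(queries):
--     seen = set()
--     res = []
--     best = 0
--     for i in queries:
--         if i not in seen:
--             left = 0
--             while (i - 1 - left) in seen:
--                 left += 1
--             right = 0
--             while (i + 1 + right) in seen:
--                 right += 1
--             seen.add(i)
--             best = max(best, left + right + 1)
--         res.append(best)
--     return res
-- ===== Notes on version B (the rewrite author's own statement) =====
-- stated objective: simpler
-- what changed: B keeps only a set of built positions and measures the merged segment by walking left and right over the set, instead of A's dict that caches segment sizes at segment boundary cells.
import Mathlib
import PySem

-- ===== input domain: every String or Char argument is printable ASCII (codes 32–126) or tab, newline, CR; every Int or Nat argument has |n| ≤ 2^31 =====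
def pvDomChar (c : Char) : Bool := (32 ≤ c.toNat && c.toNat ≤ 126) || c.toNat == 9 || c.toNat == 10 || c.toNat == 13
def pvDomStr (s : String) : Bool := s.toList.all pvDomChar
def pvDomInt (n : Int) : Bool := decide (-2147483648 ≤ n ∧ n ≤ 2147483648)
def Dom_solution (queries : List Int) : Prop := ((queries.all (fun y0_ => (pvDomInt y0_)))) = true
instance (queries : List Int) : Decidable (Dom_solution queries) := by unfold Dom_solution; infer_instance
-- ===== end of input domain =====

-- B replaces A's boundary-size dict by a plain set of built positions, measuring each
-- merged segment by walking left/right over the set (simpler state, no cached sizes).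

-- ===== PORT A =====
def stepA (st : PySem.Dict Int Int × List Int × Int) (i : Int) : PySem.Dict Int Int × List Int × Int :=
  let d := st.1
  let res := st.2.1
  let mx := st.2.2
  if d.contains i then (d, res ++ [mx], mx)
  else
    let L := d.getD (i - 1) 0
    let R := d.getD (i + 1) 0
    let T := L + R + 1
    let d' := ((d.insert i T).insert (i - L) T).insert (i + R) T
    let mx' := max mx T
    (d', res ++ [mx'], mx')

def solution (queries : List Int) : List Int :=
  (queries.foldl stepA (PySem.Dict.empty, [], 0)).2.1

-- ===== PORT B =====
-- fuel (= current set size) is only a totality guard for Python's `while (i-1-left) in seen`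
-- walk: a contiguous run inside a set of that size is never longer than the size.
def runDown (fuel : Nat) (S : List Int) (j : Int) : Nat :=
  match fuel with
  | 0 => 0
  | f + 1 => if j ∈ S then runDown f S (j - 1) + 1 else 0

def runUp (fuel : Nat) (S : List Int) (j : Int) : Nat :=
  match fuel with
  | 0 => 0
  | f + 1 => if j ∈ S then runUp f S (j + 1) + 1 else 0

def stepB (st : PySem.Set Int × List Int × Int) (i : Int) : PySem.Set Int × List Int × Int :=
  let S := st.1
  let res := st.2.1
  let best := st.2.2
  if i ∈ S then (S, res ++ [best], best)
  else
    let left := runDown S.length S (i - 1)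
    let right := runUp S.length S (i + 1)
    let S' := PySem.Set.add S i
    let best' := max best ((left : Int) + (right : Int) + 1)
    (S', res ++ [best'], best')

def solution_alt (queries : List Int) : List Int :=
  (queries.foldl stepB (PySem.Set.empty, [], 0)).2.1

-- ===== PRECONDITION & SPEC =====
def Spec_solution (queries : List Int) (out : List Int) : Prop := out = solution_alt queries
instance (queries : List Int) (out : List Int) : Decidable (Spec_solution queries out) := by unfold Spec_solution; infer_instance

-- ===== CLAIM (what is proved, stated in full; the proofs are below) =====
def Claim_equal_solution : Prop := ∀ (queries : List Int), Dom_solution queries → Spec_solution queries (solution queries)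

-- ===== LEMMAS AND PROOFS =====

-- The dict of A and the set of B are related: same key set, and at every run
-- boundary of the set, A's dict stores exactly the run length.
def DRel (d : PySem.Dict Int Int) (S : List Int) : Prop :=
  S.Nodup ∧
  (∀ j : Int, d.contains j = true ↔ j ∈ S) ∧
  (∀ j : Int, j ∈ S → (j + 1) ∉ S → d.getD j 0 = (runDown S.length S j : Int)) ∧
  (∀ j : Int, j ∈ S → (j - 1) ∉ S → d.getD j 0 = (runUp S.length S j : Int))

theorem runDown_spec (fuel : Nat) (S : List Int) (j : Int) (n : Nat)
    (hfuel : n ≤ fuel) (hmem : ∀ k : Nat, k < n → j - (k : Int) ∈ S)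
    (hnot : j - (n : Int) ∉ S) : runDown fuel S j = n := by
  induction n generalizing fuel j with
  | zero =>
    cases fuel with
    | zero => rfl
    | succ f =>
      simp only [Nat.cast_zero, sub_zero] at hnot
      simp [runDown, hnot]
  | succ n ih =>
    cases fuel with
    | zero => omega
    | succ f =>
      have hj : j ∈ S := by simpa using hmem 0 (by omega)
      simp only [runDown, if_pos hj]
      have h1 : runDown f S (j - 1) = n := by
        refine ih f (j - 1) (by omega) (fun k hk => ?_) ?_
        · have := hmem (k + 1) (by omega)
          have e : j - ((k + 1 : Nat) : Int) = j - 1 - (k : Int) := by push_cast; ring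
          rwa [e] at this
        · have e : j - ((n + 1 : Nat) : Int) = j - 1 - (n : Int) := by push_cast; ring
          rwa [e] at hnot
      omega

theorem runUp_spec (fuel : Nat) (S : List Int) (j : Int) (n : Nat)
    (hfuel : n ≤ fuel) (hmem : ∀ k : Nat, k < n → j + (k : Int) ∈ S)
    (hnot : j + (n : Int) ∉ S) : runUp fuel S j = n := by
  induction n generalizing fuel j with
  | zero =>
    cases fuel with
    | zero => rfl
    | succ f =>
      simp only [Nat.cast_zero, add_zero] at hnot
      simp [runUp, hnot]
  | succ n ih =>
    cases fuel with
    | zero => omega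
    | succ f =>
      have hj : j ∈ S := by simpa using hmem 0 (by omega)
      simp only [runUp, if_pos hj]
      have h1 : runUp f S (j + 1) = n := by
        refine ih f (j + 1) (by omega) (fun k hk => ?_) ?_
        · have := hmem (k + 1) (by omega)
          have e : j + ((k + 1 : Nat) : Int) = j + 1 + (k : Int) := by push_cast; ring
          rwa [e] at this
        · have e : j + ((n + 1 : Nat) : Int) = j + 1 + (n : Int) := by push_cast; ring
          rwa [e] at hnot
      omega

theorem runDown_mem (fuel : Nat) (S : List Int) (j : Int) :
    ∀ k : Nat, k < runDown fuel S j → j - (k : Int) ∈ S := by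
  induction fuel generalizing j with
  | zero => intro k hk; simp [runDown] at hk
  | succ f ih =>
    intro k hk
    by_cases hj : j ∈ S
    · simp only [runDown, if_pos hj] at hk
      cases k with
      | zero => simpa using hj
      | succ k =>
        have := ih (j - 1) k (by omega)
        have e : j - ((k + 1 : Nat) : Int) = j - 1 - (k : Int) := by push_cast; ring
        rwa [e]
    · simp [runDown, hj] at hk

theorem runUp_mem (fuel : Nat) (S : List Int) (j : Int) :
    ∀ k : Nat, k < runUp fuel S j → j + (k : Int) ∈ S := by
  induction fuel generalizing j with
  | zero => intro k hk; simp [runUp] at hk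
  | succ f ih =>
    intro k hk
    by_cases hj : j ∈ S
    · simp only [runUp, if_pos hj] at hk
      cases k with
      | zero => simpa using hj
      | succ k =>
        have := ih (j + 1) k (by omega)
        have e : j + ((k + 1 : Nat) : Int) = j + 1 + (k : Int) := by push_cast; ring
        rwa [e]
    · simp [runUp, hj] at hk

theorem runDown_le (fuel : Nat) (S : List Int) (j : Int) : runDown fuel S j ≤ fuel := by
  induction fuel generalizing j with
  | zero => simp [runDown]
  | succ f ih =>
    by_cases hj : j ∈ S
    · simp only [runDown, if_pos hj]
      have := ih (j - 1); omega
    · simp [runDown, hj]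

theorem runUp_le (fuel : Nat) (S : List Int) (j : Int) : runUp fuel S j ≤ fuel := by
  induction fuel generalizing j with
  | zero => simp [runUp]
  | succ f ih =>
    by_cases hj : j ∈ S
    · simp only [runUp, if_pos hj]
      have := ih (j + 1); omega
    · simp [runUp, hj]

theorem runDown_notmem (fuel : Nat) (S : List Int) (j : Int)
    (h : runDown fuel S j < fuel) : j - (runDown fuel S j : Int) ∉ S := by
  induction fuel generalizing j with
  | zero => omega
  | succ f ih =>
    by_cases hj : j ∈ S
    · simp only [runDown, if_pos hj] at h ⊢
      have := ih (j - 1) (by omega)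
      have e : j - ((runDown f S (j - 1) + 1 : Nat) : Int) = j - 1 - (runDown f S (j - 1) : Int) := by
        push_cast; ring
      rwa [e]
    · simp only [runDown, if_neg hj]
      simpa using hj

theorem runUp_notmem (fuel : Nat) (S : List Int) (j : Int)
    (h : runUp fuel S j < fuel) : j + (runUp fuel S j : Int) ∉ S := by
  induction fuel generalizing j with
  | zero => omega
  | succ f ih =>
    by_cases hj : j ∈ S
    · simp only [runUp, if_pos hj] at h ⊢
      have := ih (j + 1) (by omega)
      have e : j + ((runUp f S (j + 1) + 1 : Nat) : Int) = j + 1 + (runUp f S (j + 1) : Int) := by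
        push_cast; ring
      rwa [e]
    · simp only [runUp, if_neg hj]
      simpa using hj

theorem nodup_subset_length {M S : List Int} (hM : M.Nodup) (hsub : M ⊆ S) :
    M.length ≤ S.length :=
  (List.subperm_of_subset hM hsub).length_le

theorem runDown_char (S : List Int) (_hS : S.Nodup) (j : Int) :
    (∀ k : Nat, k < runDown S.length S j → j - (k : Int) ∈ S) ∧
      j - (runDown S.length S j : Int) ∉ S := by
  refine ⟨runDown_mem _ _ _, ?_⟩
  have hle := runDown_le S.length S j
  rcases Nat.lt_or_ge (runDown S.length S j) S.length with hlt | hge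
  · exact runDown_notmem _ _ _ hlt
  · have heq : runDown S.length S j = S.length := le_antisymm hle hge
    set n := runDown S.length S j with hn
    intro habs
    set M : List Int := (List.range n).map (fun k : Nat => j - (k : Int)) with hM
    have hMnd : M.Nodup := by
      refine List.Nodup.map ?_ (List.nodup_range)
      intro a b hab
      simp only at hab
      omega
    have hsub : M ⊆ S := by
      intro x hx
      rw [hM, List.mem_map] at hx
      obtain ⟨k, hk, rfl⟩ := hx
      exact runDown_mem _ _ _ k (List.mem_range.mp hk)
    have hperm : M.Perm S := by
      refine (List.subperm_of_subset hMnd hsub).perm_of_length_le ?_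
      simp [hM, heq]
    have : j - (n : Int) ∈ M := hperm.mem_iff.mpr habs
    rw [hM, List.mem_map] at this
    obtain ⟨k, hk, hkeq⟩ := this
    have hk' := List.mem_range.mp hk
    clear_value n
    omega

theorem runUp_char (S : List Int) (_hS : S.Nodup) (j : Int) :
    (∀ k : Nat, k < runUp S.length S j → j + (k : Int) ∈ S) ∧
      j + (runUp S.length S j : Int) ∉ S := by
  refine ⟨runUp_mem _ _ _, ?_⟩
  have hle := runUp_le S.length S j
  rcases Nat.lt_or_ge (runUp S.length S j) S.length with hlt | hge
  · exact runUp_notmem _ _ _ hlt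
  · have heq : runUp S.length S j = S.length := le_antisymm hle hge
    set n := runUp S.length S j with hn
    intro habs
    set M : List Int := (List.range n).map (fun k : Nat => j + (k : Int)) with hM
    have hMnd : M.Nodup := by
      refine List.Nodup.map ?_ (List.nodup_range)
      intro a b hab
      simp only at hab
      omega
    have hsub : M ⊆ S := by
      intro x hx
      rw [hM, List.mem_map] at hx
      obtain ⟨k, hk, rfl⟩ := hx
      exact runUp_mem _ _ _ k (List.mem_range.mp hk)
    have hperm : M.Perm S := by
      refine (List.subperm_of_subset hMnd hsub).perm_of_length_le ?_
      simp [hM, heq]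
    have : j + (n : Int) ∈ M := hperm.mem_iff.mpr habs
    rw [hM, List.mem_map] at this
    obtain ⟨k, hk, hkeq⟩ := this
    have hk' := List.mem_range.mp hk
    clear_value n
    omega

-- i ∉ S: both runs live inside S and are disjoint, so their total is ≤ |S|
theorem runs_card (S : List Int) (_hS : S.Nodup) (i : Int) (hi : i ∉ S) :
    runDown S.length S (i - 1) + runUp S.length S (i + 1) ≤ S.length := by
  set L := runDown S.length S (i - 1) with hL
  set R := runUp S.length S (i + 1) with hR
  set M : List Int := (List.range L).map (fun k : Nat => i - 1 - (k : Int)) ++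
    (List.range R).map (fun k : Nat => i + 1 + (k : Int)) with hM
  have hMnd : M.Nodup := by
    rw [hM]
    refine List.Nodup.append ?_ ?_ ?_
    · refine List.Nodup.map ?_ (List.nodup_range)
      intro a b hab
      simp only at hab
      omega
    · refine List.Nodup.map ?_ (List.nodup_range)
      intro a b hab
      simp only at hab
      omega
    · intro x hx hy
      rw [List.mem_map] at hx hy
      obtain ⟨k, _, rfl⟩ := hx
      obtain ⟨m, _, hme⟩ := hy
      omega
  have hsub : M ⊆ S := by
    intro x hx
    rw [hM, List.mem_append] at hx
    rcases hx with hx | hx <;> rw [List.mem_map] at hx <;> obtain ⟨k, hk, rfl⟩ := hx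
    · exact runDown_mem _ _ _ k (List.mem_range.mp hk)
    · exact runUp_mem _ _ _ k (List.mem_range.mp hk)
  have := nodup_subset_length hMnd hsub
  simpa [hM] using this

theorem runDown_zero (fuel : Nat) (S : List Int) (j : Int) (h : j ∉ S) :
    runDown fuel S j = 0 := by
  cases fuel <;> simp [runDown, h]

theorem runUp_zero (fuel : Nat) (S : List Int) (j : Int) (h : j ∉ S) :
    runUp fuel S j = 0 := by
  cases fuel <;> simp [runUp, h]

theorem step_rel (d : PySem.Dict Int Int) (S : List Int) (res : List Int) (mx : Int)
    (q : Int) (h : DRel d S) :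
    (stepA (d, res, mx) q).2 = (stepB (S, res, mx) q).2 ∧
      DRel (stepA (d, res, mx) q).1 (stepB (S, res, mx) q).1 := by
  obtain ⟨hnd, hkeys, hdown, hup⟩ := h
  by_cases hq : q ∈ S
  · have hc : d.contains q = true := (hkeys q).mpr hq
    constructor <;> simp only [stepA, stepB, hc, if_pos hq, if_true]
    exact ⟨hnd, hkeys, hdown, hup⟩
  · have hc : d.contains q = false := by
      rcases Bool.eq_false_or_eq_true (d.contains q) with hb | hb
      · exact absurd ((hkeys q).mp hb) hq
      · exact hb
    obtain ⟨hdc1, hdc2⟩ := runDown_char S hnd (q - 1)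
    obtain ⟨huc1, huc2⟩ := runUp_char S hnd (q + 1)
    have hcard := runs_card S hnd q hq
    have hLA : d.getD (q - 1) 0 = ((runDown S.length S (q - 1) : Nat) : Int) := by
      by_cases h1 : (q - 1) ∈ S
      · exact hdown (q - 1) h1 (by simpa using hq)
      · rw [runDown_zero _ _ _ h1]
        have hc1 : d.contains (q - 1) = false := by
          rcases Bool.eq_false_or_eq_true (d.contains (q - 1)) with hb | hb
          · exact absurd ((hkeys _).mp hb) h1
          · exact hb
        simp [PySem.Dict.getD_of_not_contains d 0 hc1]
    have hRA : d.getD (q + 1) 0 = ((runUp S.length S (q + 1) : Nat) : Int) := by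
      by_cases h1 : (q + 1) ∈ S
      · exact hup (q + 1) h1 (by simpa using hq)
      · rw [runUp_zero _ _ _ h1]
        have hc1 : d.contains (q + 1) = false := by
          rcases Bool.eq_false_or_eq_true (d.contains (q + 1)) with hb | hb
          · exact absurd ((hkeys _).mp hb) h1
          · exact hb
        simp [PySem.Dict.getD_of_not_contains d 0 hc1]
    have hS' : PySem.Set.add S q = S ++ [q] := PySem.Set.add_of_not_mem hq
    set L := runDown S.length S (q - 1) with hL
    set R := runUp S.length S (q + 1) with hR
    set T : Int := (L : Int) + (R : Int) + 1 with hT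
    have eA : stepA (d, res, mx) q =
        (((d.insert q T).insert (q - (L : Int)) T).insert (q + (R : Int)) T,
          res ++ [max mx T], max mx T) := by
      simp only [stepA, hc, Bool.false_eq_true, if_false, hLA, hRA, hT]
    have eB : stepB (S, res, mx) q =
        (S ++ [q], res ++ [max mx T], max mx T) := by
      simp only [stepB, if_neg hq, hS', hT, ← hL, ← hR]
    rw [eA, eB]
    have hndS' : (S ++ [q]).Nodup := by
      refine List.Nodup.append hnd (List.nodup_singleton q) ?_
      intro a ha hb
      rw [List.mem_singleton] at hb
      exact hq (hb ▸ ha)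
    have hget : ∀ x : Int,
        (((d.insert q T).insert (q - (L : Int)) T).insert (q + (R : Int)) T).getD x 0 =
          if x = q + (R : Int) then T else if x = q - (L : Int) then T
            else if x = q then T else d.getD x 0 := by
      intro x
      rw [PySem.Dict.getD_insert, PySem.Dict.getD_insert, PySem.Dict.getD_insert]
    refine ⟨rfl, hndS', ?_, ?_, ?_⟩
    · -- key set = S ∪ {q}
      intro j
      rw [PySem.Dict.contains_insert, PySem.Dict.contains_insert, PySem.Dict.contains_insert]
      simp only [Bool.or_eq_true, beq_iff_eq, hkeys j, List.mem_append, List.mem_singleton]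
      constructor
      · rintro (h1 | h1 | h1 | h1)
        · rcases Nat.eq_zero_or_pos R with h0 | h0
          · right; omega
          · left
            have hm := huc1 (R - 1) (by omega)
            have e : q + 1 + ((R - 1 : Nat) : Int) = q + (R : Int) := by omega
            rw [e] at hm; rwa [h1]
        · rcases Nat.eq_zero_or_pos L with h0 | h0
          · right; omega
          · left
            have hm := hdc1 (L - 1) (by omega)
            have e : q - 1 - ((L - 1 : Nat) : Int) = q - (L : Int) := by omega
            rw [e] at hm; rwa [h1]
        · right; exact h1
        · left; exact h1
      · rintro (h1 | h1)
        · right; right; right; exact h1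
        · right; right; left; exact h1
    · -- right-boundary values (runDown)
      intro j hj hj1
      simp only [List.mem_append, List.mem_singleton] at hj hj1
      push_neg at hj1
      simp only [List.length_append, List.length_singleton]
      by_cases hcase : j = q + (R : Int)
      · have hrun : runDown (S.length + 1) (S ++ [q]) (q + (R : Int)) = L + R + 1 := by
          apply runDown_spec _ _ _ _ (by omega) ?_ ?_
          · intro k hk
            rcases Nat.lt_trichotomy k R with hkR | hkR | hkR
            · have hm := huc1 (R - 1 - k) (by omega)
              have e : q + 1 + ((R - 1 - k : Nat) : Int) = q + (R : Int) - (k : Int) := by omega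
              rw [e] at hm
              exact List.mem_append.mpr (Or.inl hm)
            · have e : q + (R : Int) - (k : Int) = q := by omega
              rw [e]; simp
            · have hm := hdc1 (k - R - 1) (by omega)
              have e : q - 1 - ((k - R - 1 : Nat) : Int) = q + (R : Int) - (k : Int) := by omega
              rw [e] at hm
              exact List.mem_append.mpr (Or.inl hm)
          · have e : q + (R : Int) - ((L + R + 1 : Nat) : Int) = q - 1 - (L : Int) := by omega
            rw [e]
            simp only [List.mem_append, List.mem_singleton]
            rintro (hx | hx)
            · exact hdc2 hx
            · omega
        rw [hget j, if_pos hcase, hcase, hrun]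
        push_cast
        ring
      · have hjne_q : j ≠ q := by
          intro he
          have hR0 : R ≠ 0 := fun h0 => hcase (by rw [he, h0]; simp)
          have hm : q + 1 ∈ S := by simpa using huc1 0 (by omega)
          exact hj1.1 (by rw [he]; exact hm)
        have hjS : j ∈ S := by
          rcases hj with h1 | h1
          · exact h1
          · exact absurd h1 hjne_q
        have hjne_L : j ≠ q - (L : Int) := by
          intro he
          have hL1 : 1 ≤ L := by
            by_contra h0
            exact hjne_q (by omega)
          rcases Nat.lt_or_ge 1 L with h2 | h2
          · have hm := hdc1 (L - 2) (by omega)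
            have e : q - 1 - ((L - 2 : Nat) : Int) = j + 1 := by omega
            rw [e] at hm
            exact hj1.1 hm
          · exact hj1.2 (by omega)
        obtain ⟨hc1, hc2⟩ := runDown_char S hnd j
        set n := runDown S.length S j with hn
        have hold : d.getD j 0 = (n : Int) := hdown j hjS hj1.1
        have hnpos : 1 ≤ n := by
          by_contra h0
          push_neg at h0
          have h0' : n = 0 := by omega
          rw [h0'] at hc2
          simp at hc2
          exact hc2 hjS
        have hne_qn : j - (n : Int) ≠ q := by
          intro he
          have hm := hc1 (n - 1) (by omega)
          have e : j - ((n - 1 : Nat) : Int) = q + 1 := by omega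
          rw [e] at hm
          have hR1 : 1 ≤ R := by
            by_contra h0
            push_neg at h0
            have h0' : R = 0 := by omega
            rw [h0'] at huc2
            simp at huc2
            exact huc2 hm
          rcases Nat.lt_trichotomy n R with h1 | h1 | h1
          · have hm2 := huc1 n h1
            have e2 : q + 1 + (n : Int) = j + 1 := by omega
            rw [e2] at hm2
            exact hj1.1 hm2
          · exact hcase (by omega)
          · have hm2 := hc1 (n - 1 - R) (by omega)
            have e2 : j - ((n - 1 - R : Nat) : Int) = q + 1 + (R : Int) := by omega
            rw [e2] at hm2
            exact huc2 hm2
        have hrun : runDown (S.length + 1) (S ++ [q]) j = n := by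
          apply runDown_spec _ _ _ _ (by have := runDown_le S.length S j; omega) ?_ ?_
          · intro k hk
            exact List.mem_append.mpr (Or.inl (hc1 k hk))
          · simp only [List.mem_append, List.mem_singleton]
            rintro (hx | hx)
            · exact hc2 hx
            · exact hne_qn hx
        rw [hget j, if_neg hcase, if_neg hjne_L, if_neg hjne_q, hold, hrun]
    · -- left-boundary values (runUp)
      intro j hj hj1
      simp only [List.mem_append, List.mem_singleton] at hj hj1
      push_neg at hj1
      simp only [List.length_append, List.length_singleton]
      by_cases hcase : j = q - (L : Int)
      · have hrun : runUp (S.length + 1) (S ++ [q]) (q - (L : Int)) = L + R + 1 := by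
          apply runUp_spec _ _ _ _ (by omega) ?_ ?_
          · intro k hk
            rcases Nat.lt_trichotomy k L with hkL | hkL | hkL
            · have hm := hdc1 (L - 1 - k) (by omega)
              have e : q - 1 - ((L - 1 - k : Nat) : Int) = q - (L : Int) + (k : Int) := by omega
              rw [e] at hm
              exact List.mem_append.mpr (Or.inl hm)
            · have e : q - (L : Int) + (k : Int) = q := by omega
              rw [e]; simp
            · have hm := huc1 (k - L - 1) (by omega)
              have e : q + 1 + ((k - L - 1 : Nat) : Int) = q - (L : Int) + (k : Int) := by omega
              rw [e] at hm
              exact List.mem_append.mpr (Or.inl hm)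
          · have e : q - (L : Int) + ((L + R + 1 : Nat) : Int) = q + 1 + (R : Int) := by omega
            rw [e]
            simp only [List.mem_append, List.mem_singleton]
            rintro (hx | hx)
            · exact huc2 hx
            · omega
        rw [hget j, hcase, hrun]
        split_ifs <;> omega
      · have hjne_q : j ≠ q := by
          intro he
          have hL0 : L ≠ 0 := fun h0 => hcase (by rw [he, h0]; simp)
          have hm : q - 1 ∈ S := by simpa using hdc1 0 (by omega)
          exact hj1.1 (by rw [he]; exact hm)
        have hjS : j ∈ S := by
          rcases hj with h1 | h1
          · exact h1
          · exact absurd h1 hjne_q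
        have hjne_R : j ≠ q + (R : Int) := by
          intro he
          have hR1 : 1 ≤ R := by
            by_contra h0
            exact hjne_q (by omega)
          rcases Nat.lt_or_ge 1 R with h2 | h2
          · have hm := huc1 (R - 2) (by omega)
            have e : q + 1 + ((R - 2 : Nat) : Int) = j - 1 := by omega
            rw [e] at hm
            exact hj1.1 hm
          · exact hj1.2 (by omega)
        obtain ⟨hc1, hc2⟩ := runUp_char S hnd j
        set n := runUp S.length S j with hn
        have hold : d.getD j 0 = (n : Int) := hup j hjS hj1.1
        have hnpos : 1 ≤ n := by
          by_contra h0
          push_neg at h0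
          have h0' : n = 0 := by omega
          rw [h0'] at hc2
          simp at hc2
          exact hc2 hjS
        have hne_qn : j + (n : Int) ≠ q := by
          intro he
          have hm := hc1 (n - 1) (by omega)
          have e : j + ((n - 1 : Nat) : Int) = q - 1 := by omega
          rw [e] at hm
          have hL1 : 1 ≤ L := by
            by_contra h0
            push_neg at h0
            have h0' : L = 0 := by omega
            rw [h0'] at hdc2
            simp at hdc2
            exact hdc2 hm
          rcases Nat.lt_trichotomy n L with h1 | h1 | h1
          · have hm2 := hdc1 n h1
            have e2 : q - 1 - (n : Int) = j - 1 := by omega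
            rw [e2] at hm2
            exact hj1.1 hm2
          · exact hcase (by omega)
          · have hm2 := hc1 (n - 1 - L) (by omega)
            have e2 : j + ((n - 1 - L : Nat) : Int) = q - 1 - (L : Int) := by omega
            rw [e2] at hm2
            exact hdc2 hm2
        have hrun : runUp (S.length + 1) (S ++ [q]) j = n := by
          apply runUp_spec _ _ _ _ (by have := runUp_le S.length S j; omega) ?_ ?_
          · intro k hk
            exact List.mem_append.mpr (Or.inl (hc1 k hk))
          · simp only [List.mem_append, List.mem_singleton]
            rintro (hx | hx)
            · exact hc2 hx
            · exact hne_qn hx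
        rw [hget j, if_neg hjne_R, if_neg hcase, if_neg hjne_q, hold, hrun]

theorem fold_rel (qs : List Int) : ∀ (d : PySem.Dict Int Int) (S : List Int)
    (res : List Int) (mx : Int), DRel d S →
    (qs.foldl stepA (d, res, mx)).2 = (qs.foldl stepB (S, res, mx)).2 := by
  induction qs with
  | nil => intro d S res mx _; rfl
  | cons q qs ih =>
    intro d S res mx h
    obtain ⟨h2, hrel⟩ := step_rel d S res mx q h
    rcases ha : stepA (d, res, mx) q with ⟨d', r1, m1⟩
    rcases hb : stepB (S, res, mx) q with ⟨S', r2, m2⟩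
    rw [ha, hb] at h2 hrel
    have hr : r1 = r2 := congrArg (fun p => p.1) h2
    have hm : m1 = m2 := congrArg (fun p => p.2) h2
    subst hr
    subst hm
    rw [List.foldl_cons, List.foldl_cons, ha, hb]
    exact ih d' S' r1 m1 hrel

-- ===== VERDICT (by name: the statement is the Claim_ definition above) =====
theorem solution_spec : Claim_equal_solution := by
  intro queries _
  unfold Spec_solution solution solution_alt
  have h := fold_rel queries PySem.Dict.empty PySem.Set.empty [] 0
    (by
      refine ⟨List.nodup_nil, fun j => ?_, fun j hj => absurd hj (List.not_mem_nil), fun j hj => absurd hj (List.not_mem_nil)⟩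
      simp [PySem.Dict.contains_empty, PySem.Set.empty])
  exact congrArg Prod.fst h
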